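-- pv_equiv track=rewrite | github.com/kishoreUdatha/BharatBuild_AI | backend/app/utils/response_parser.py | parse_challenges
-- ===== SOURCE A (Python) =====
-- from typing import Dict, Any, List
--
-- def parse_challenges(text: str) -> List[Dict[str, str]]:
--     """Parse challenges and solutions"""
--     challenges = []
--     current_challenge = {}
--
--     for line in text.split('\n'):
--         line = line.strip()
--
--         if line.startswith('CHALLENGE:'):
--             if current_challenge:
--                 challenges.append(current_challenge)
--             current_challenge = {'challenge': line.split(':', 1)[1].strip()}
--
--         elif ':' in line:
--             key, value = line.split(':', 1)
--             key = key.strip().lower()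
--             current_challenge[key] = value.strip()
--
--     if current_challenge:
--         challenges.append(current_challenge)
--
--     return challenges
-- ===== SOURCE B (Python) =====
-- def _parse_block(seg):
--     d = {}
--     if seg and seg[0].startswith('CHALLENGE:'):
--         d['challenge'] = seg[0].split(':', 1)[1].strip()
--         seg = seg[1:]
--     for ln in seg:
--         if ':' in ln:
--             k, v = ln.split(':', 1)
--             d[k.strip().lower()] = v.strip()
--     return d
--
--
-- def parse_challenges(text):
--     # segmentation pass: cut the stripped lines at every CHALLENGE: line
--     segs, cur = [], []
--     for ln in text.split('\n'):
--         ln = ln.strip()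
--         if ln.startswith('CHALLENGE:'):
--             segs.append(cur)
--             cur = [ln]
--         else:
--             cur.append(ln)
--     segs.append(cur)
--     # per-block parse, dropping empty blocks
--     return [d for d in map(_parse_block, segs) if d]
-- ===== Notes on version B (the rewrite author's own statement) =====
-- stated objective: alternative
-- what changed: Replaced A's single stateful fold carrying a current dict with a two-phase decomposition: a segmentation pass that cuts the stripped lines at each CHALLENGE: line, then an independent per-segment parser whose non-empty dicts are collected.
import Mathlib
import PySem

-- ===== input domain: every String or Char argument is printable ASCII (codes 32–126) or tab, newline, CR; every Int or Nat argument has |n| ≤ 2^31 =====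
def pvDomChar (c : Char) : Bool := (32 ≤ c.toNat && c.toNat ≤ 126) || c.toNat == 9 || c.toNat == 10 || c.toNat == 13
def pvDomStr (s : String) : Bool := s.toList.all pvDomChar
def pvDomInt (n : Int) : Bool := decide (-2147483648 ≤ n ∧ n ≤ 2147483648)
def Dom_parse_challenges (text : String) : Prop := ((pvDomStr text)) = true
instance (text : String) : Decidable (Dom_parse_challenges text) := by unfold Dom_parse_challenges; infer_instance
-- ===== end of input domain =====

-- B restructures A's single stateful fold into a segmentation pass plus a per-block parser (objective: alternative decomposition, same cost).

-- ===== PORT A =====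
-- shared primitive: line.split(':', 1)  (sep is nonempty, so splitMax? is always `some`)
def pvSplit1 (line : String) : List String :=
  (PySem.Str.splitMax? line ":" 1).getD []

-- one iteration of A's for-loop over (challenges, current_challenge)
def pvStepA (st : List (PySem.Dict String String) × PySem.Dict String String)
    (rawline : String) : List (PySem.Dict String String) × PySem.Dict String String :=
  let line := PySem.Str.strip rawline
  if PySem.Str.startswith line "CHALLENGE:" then
    let challenges := if st.2.items.isEmpty then st.1 else st.1 ++ [st.2]
    -- line.split(':', 1)[1]: ':' occurs in line here, so the list has two parts; [1] via List.getD
    (challenges, PySem.Dict.ofList [("challenge", PySem.Str.strip ((pvSplit1 line).getD 1 ""))])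
  else if PySem.Str.isIn ":" line then
    match pvSplit1 line with
    | key :: value :: _ =>
        (st.1, st.2.insert (PySem.Str.lower (PySem.Str.strip key)) (PySem.Str.strip value))
    | _ => st  -- unreachable: ':' in line gives two parts
  else st

def parse_challenges (text : String) : List (List (String × String)) :=
  let r := ((PySem.Str.split? text "\n").getD []).foldl pvStepA ([], PySem.Dict.empty)
  let challenges := if r.2.items.isEmpty then r.1 else r.1 ++ [r.2]
  challenges.map (·.items)

-- ===== PORT B =====
-- body of _parse_block's key:value loop
def pvKVStep (d : PySem.Dict String String) (ln : String) : PySem.Dict String String :=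
  if PySem.Str.isIn ":" ln then
    match pvSplit1 ln with
    | k :: v :: _ => d.insert (PySem.Str.lower (PySem.Str.strip k)) (PySem.Str.strip v)
    | _ => d  -- unreachable: ':' in ln gives two parts
  else d

-- _parse_block: seed from a leading CHALLENGE: line, then fold the key:value loop
def pvParseBlock (seg : List String) : PySem.Dict String String :=
  match seg with
  | ln :: rest =>
    if PySem.Str.startswith ln "CHALLENGE:" then
      rest.foldl pvKVStep
        (PySem.Dict.ofList [("challenge", PySem.Str.strip ((pvSplit1 ln).getD 1 ""))])
    else (ln :: rest).foldl pvKVStep PySem.Dict.empty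
  | [] => PySem.Dict.empty

-- segmentation pass: (segs, cur); a CHALLENGE: line closes cur and opens a new segment
def pvSegStep (st : List (List String) × List String) (rawline : String) :
    List (List String) × List String :=
  let ln := PySem.Str.strip rawline
  if PySem.Str.startswith ln "CHALLENGE:" then (st.1 ++ [st.2], [ln])
  else (st.1, st.2 ++ [ln])

def parse_challenges_alt (text : String) : List (List (String × String)) :=
  let r := ((PySem.Str.split? text "\n").getD []).foldl pvSegStep ([], [])
  let segs := r.1 ++ [r.2]
  (((segs.map pvParseBlock).filter (fun d => !d.items.isEmpty)).map (·.items))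

-- ===== PRECONDITION & SPEC =====
def Spec_parse_challenges (text : String) (out : List (List (String × String))) : Prop := out = parse_challenges_alt text
instance (text : String) (out : List (List (String × String))) : Decidable (Spec_parse_challenges text out) := by unfold Spec_parse_challenges; infer_instance

-- ===== CLAIM (what is proved, stated in full; the proofs are below) =====
def Claim_equal_parse_challenges : Prop := ∀ (text : String), Dom_parse_challenges text → Spec_parse_challenges text (parse_challenges text)

-- ===== LEMMAS AND PROOFS =====

-- appending a non-CHALLENGE (stripped) line to a segment = applying the key:value step to its parse
lemma parseBlock_append (seg : List String) (ln : String)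
    (h : PySem.Str.startswith ln "CHALLENGE:" = false) :
    pvParseBlock (seg ++ [ln]) = pvKVStep (pvParseBlock seg) ln := by
  cases seg with
  | nil =>
    simp only [List.nil_append, pvParseBlock, h, Bool.false_eq_true, reduceIte,
      List.foldl_cons, List.foldl_nil]
  | cons c rest =>
    simp only [List.cons_append, pvParseBlock]
    by_cases hc : PySem.Str.startswith c "CHALLENGE:" = true
    · simp only [hc, reduceIte, List.foldl_append, List.foldl_cons, List.foldl_nil]
    · rw [Bool.not_eq_true] at hc
      simp only [hc, Bool.false_eq_true, reduceIte, ← List.cons_append,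
        List.foldl_append, List.foldl_cons, List.foldl_nil]

-- filtering the parse of segs ++ [cur] = A's "append current if non-empty"
lemma filter_append_block (segs : List (List String)) (cur : List String) :
    ((segs ++ [cur]).map pvParseBlock).filter (fun d => !d.items.isEmpty)
      = (if (pvParseBlock cur).items.isEmpty
          then (segs.map pvParseBlock).filter (fun d => !d.items.isEmpty)
          else (segs.map pvParseBlock).filter (fun d => !d.items.isEmpty) ++ [pvParseBlock cur]) := by
  by_cases h : (pvParseBlock cur).items.isEmpty <;>
    simp [h, List.filter_append]

-- the main invariant: A's fold state tracks B's segmentation state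
lemma fold_inv (lines : List String) (segs : List (List String)) (cur : List String) :
    lines.foldl pvStepA
        ((segs.map pvParseBlock).filter (fun d => !d.items.isEmpty), pvParseBlock cur)
      = (((lines.foldl pvSegStep (segs, cur)).1.map pvParseBlock).filter (fun d => !d.items.isEmpty),
          pvParseBlock (lines.foldl pvSegStep (segs, cur)).2) := by
  induction lines generalizing segs cur with
  | nil => rfl
  | cons raw rest ih =>
    simp only [List.foldl_cons]
    by_cases h : PySem.Str.startswith (PySem.Str.strip raw) "CHALLENGE:" = true
    · have hblock : pvParseBlock [PySem.Str.strip raw]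
          = PySem.Dict.ofList [("challenge",
              PySem.Str.strip ((pvSplit1 (PySem.Str.strip raw)).getD 1 ""))] := by
        simp only [pvParseBlock, h, reduceIte, List.foldl_nil]
      have hstep : pvStepA
          ((segs.map pvParseBlock).filter (fun d => !d.items.isEmpty), pvParseBlock cur) raw
          = (((segs ++ [cur]).map pvParseBlock).filter (fun d => !d.items.isEmpty),
              pvParseBlock [PySem.Str.strip raw]) := by
        rw [filter_append_block, hblock]
        simp only [pvStepA, h, reduceIte]
      have hseg : pvSegStep (segs, cur) raw = (segs ++ [cur], [PySem.Str.strip raw]) := by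
        simp only [pvSegStep, h, reduceIte]
      rw [hstep, hseg, ih]
    · rw [Bool.not_eq_true] at h
      have hstep : ∀ (cs : List (PySem.Dict String String)) (d : PySem.Dict String String),
          pvStepA (cs, d) raw = (cs, pvKVStep d (PySem.Str.strip raw)) := by
        intro cs d
        unfold pvStepA pvKVStep
        dsimp only
        rw [if_neg ((Bool.not_eq_true _) ▸ h)]
        by_cases hc : PySem.Str.isIn ":" (PySem.Str.strip raw) = true
        · rw [if_pos hc, if_pos hc]
          cases pvSplit1 (PySem.Str.strip raw) with
          | nil => rfl
          | cons a t => cases t <;> rfl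
        · rw [if_neg hc, if_neg hc]
      have hseg : pvSegStep (segs, cur) raw = (segs, cur ++ [PySem.Str.strip raw]) := by
        simp only [pvSegStep, h, Bool.false_eq_true, reduceIte]
      rw [hstep, ← parseBlock_append cur _ h, hseg, ih]

-- ===== VERDICT (by name: the statement is the Claim_ definition above) =====
theorem parse_challenges_spec : Claim_equal_parse_challenges := by
  intro text _
  unfold Spec_parse_challenges
  simp only [parse_challenges, parse_challenges_alt]
  have h := fold_inv ((PySem.Str.split? text "\n").getD []) [] []
  rw [show ((([] : List (List String)).map pvParseBlock).filter (fun d => !d.items.isEmpty))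
        = ([] : List (PySem.Dict String String)) from rfl,
      show pvParseBlock ([] : List String) = PySem.Dict.empty from rfl] at h
  rw [h, filter_append_block]
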